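-- pv_equiv track=rewrite | github.com/divyanshu8756/PYTHON-CODE | CSE_Assign_Codes/Question_12.py | is_prime_power
-- ===== SOURCE A (Python) =====
-- import math
--
-- def is_prime_power(n):
--     if n <= 1:
--         return False
--     for p in range(2, int(math.sqrt(n)) + 1):
--         if n % p == 0:
--             while n % p == 0:
--                 n //= p
--             return n == 1
--     return True
-- ===== SOURCE B (Python) =====
-- import math
--
-- def is_prime_power(n):
--     if n <= 1:
--         return False
--     count = 0
--     temp = n
--     for p in range(2, int(math.sqrt(n)) + 1):
--         if temp % p == 0:
--             count += 1
--             while temp % p == 0: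
--                 temp //= p
--     if temp > 1:
--         count += 1
--     return count == 1
-- ===== Notes on version B (the rewrite author's own statement) =====
-- stated objective: alternative
-- what changed: B fully factors n, counting distinct prime factors in one full pass (plus a final leftover-prime check) and returning count==1, instead of A's early return after stripping the first prime found.
import Mathlib
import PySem

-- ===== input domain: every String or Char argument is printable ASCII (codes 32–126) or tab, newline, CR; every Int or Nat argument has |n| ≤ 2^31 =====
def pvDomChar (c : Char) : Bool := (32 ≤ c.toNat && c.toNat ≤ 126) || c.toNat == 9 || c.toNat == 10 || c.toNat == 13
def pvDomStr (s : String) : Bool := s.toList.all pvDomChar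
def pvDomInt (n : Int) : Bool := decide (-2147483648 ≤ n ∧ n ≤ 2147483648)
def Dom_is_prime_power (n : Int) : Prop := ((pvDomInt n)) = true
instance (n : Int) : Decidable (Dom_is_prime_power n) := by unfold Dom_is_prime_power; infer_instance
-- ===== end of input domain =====

-- B replaces A's early return after the first prime factor by a full factorization that
-- counts distinct prime factors and reports a prime power iff the count is exactly 1 (objective: alternative).
-- int(math.sqrt(n)) is ported as Nat.sqrt: exact for 0 ≤ n ≤ 2^31 (the float sqrt is correctly rounded
-- and truncation cannot cross an integer boundary in this range).

-- ===== PORT A =====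
-- the inner `while n % p == 0: n //= p` loop (shared text in both Pythons)
def pvStrip (p m : Nat) : Nat :=
  if h : m % p = 0 ∧ 2 ≤ p ∧ 0 < m then pvStrip p (m / p) else m
termination_by m
decreasing_by exact Nat.div_lt_self h.2.2 h.2.1

-- A's for-loop: early return (stripped == 1) at the first divisor found
def pvLoopA (m : Nat) : List Nat → Bool
  | [] => true
  | p :: ps => if m % p = 0 then decide (pvStrip p m = 1) else pvLoopA m ps

def is_prime_power (n : Int) : Bool :=
  if n ≤ 1 then false
  else pvLoopA n.toNat (List.range' 2 (Nat.sqrt n.toNat + 1 - 2))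

-- ===== PORT B =====
-- B's for-loop: full pass carrying (temp, count)
def pvLoopB : Nat → Nat → List Nat → Nat × Nat
  | t, c, [] => (t, c)
  | t, c, p :: ps => if t % p = 0 then pvLoopB (pvStrip p t) (c + 1) ps else pvLoopB t c ps

def is_prime_power_alt (n : Int) : Bool :=
  if n ≤ 1 then false
  else
    let r := pvLoopB n.toNat 0 (List.range' 2 (Nat.sqrt n.toNat + 1 - 2))
    decide ((if 1 < r.1 then r.2 + 1 else r.2) = 1)

-- ===== PRECONDITION & SPEC =====
def Spec_is_prime_power (n : Int) (out : Bool) : Prop := out = is_prime_power_alt n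
instance (n : Int) (out : Bool) : Decidable (Spec_is_prime_power n out) := by unfold Spec_is_prime_power; infer_instance

-- ===== CLAIM (what is proved, stated in full; the proofs are below) =====
def Claim_equal_is_prime_power : Prop := ∀ (n : Int), Dom_is_prime_power n → Spec_is_prime_power n (is_prime_power n)

-- ===== LEMMAS AND PROOFS =====

lemma pvStrip_pos (p : Nat) : ∀ m, 1 ≤ m → 1 ≤ pvStrip p m := by
  intro m
  induction m using Nat.strong_induction_on with
  | _ m ih =>
    intro hm
    rw [pvStrip]
    split
    · next h =>
      have hd : p ∣ m := Nat.dvd_of_mod_eq_zero h.1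
      have hple : p ≤ m := Nat.le_of_dvd h.2.2 hd
      exact ih (m / p) (Nat.div_lt_self h.2.2 (by omega))
        ((Nat.one_le_div_iff (by omega)).mpr hple)
    · exact hm

lemma pvLoopB_one (L : List Nat) (hL : ∀ p ∈ L, 2 ≤ p) : ∀ c, pvLoopB 1 c L = (1, c) := by
  induction L with
  | nil => intro c; rfl
  | cons p ps ih =>
    intro c
    have hp : 2 ≤ p := hL p (List.mem_cons_self ..)
    have h1 : 1 % p = 1 := Nat.mod_eq_of_lt (by omega)
    simp only [pvLoopB, h1]
    simp only [if_neg (by omega : ¬ (1 : Nat) = 0)]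
    exact ih (fun q hq => hL q (List.mem_cons_of_mem _ hq)) c

lemma pvLoopB_count (L : List Nat) : ∀ t c, 1 ≤ t → (∀ p ∈ L, 2 ≤ p) →
    c ≤ (pvLoopB t c L).2 ∧ ((pvLoopB t c L).2 = c → (pvLoopB t c L).1 = t) := by
  induction L with
  | nil => intro t c _ _; exact ⟨le_refl c, fun _ => rfl⟩
  | cons p ps ih =>
    intro t c ht hL
    have hp : 2 ≤ p := hL p (List.mem_cons_self ..)
    have hLtail : ∀ q ∈ ps, 2 ≤ q := fun q hq => hL q (List.mem_cons_of_mem _ hq)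
    simp only [pvLoopB]
    by_cases h : t % p = 0
    · simp only [if_pos h]
      obtain ⟨h1, _⟩ := ih (pvStrip p t) (c + 1) (pvStrip_pos p t ht) hLtail
      exact ⟨by omega, fun heq => by omega⟩
    · simp only [if_neg h]
      exact ih t c ht hLtail

lemma pvMain (L : List Nat) : ∀ m c, 2 ≤ m → (∀ p ∈ L, 2 ≤ p) →
    pvLoopA m L =
      decide ((if 1 < (pvLoopB m c L).1 then (pvLoopB m c L).2 + 1 else (pvLoopB m c L).2) = c + 1) := by
  induction L with
  | nil =>
    intro m c hm _
    simp only [pvLoopA, pvLoopB]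
    rw [if_pos (by omega : 1 < m)]
    simp
  | cons p ps ih =>
    intro m c hm hL
    have hp : 2 ≤ p := hL p (List.mem_cons_self ..)
    have hLtail : ∀ q ∈ ps, 2 ≤ q := fun q hq => hL q (List.mem_cons_of_mem _ hq)
    simp only [pvLoopA, pvLoopB]
    by_cases h : m % p = 0
    · simp only [if_pos h]
      by_cases h1 : pvStrip p m = 1
      · rw [h1, pvLoopB_one ps hLtail (c + 1)]
        simp
      · have ht0 : 1 ≤ pvStrip p m := pvStrip_pos p m (by omega)
        obtain ⟨hc, hfix⟩ := pvLoopB_count ps (pvStrip p m) (c + 1) ht0 hLtail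
        rw [decide_eq_false h1]
        by_cases hr : (pvLoopB (pvStrip p m) (c + 1) ps).2 = c + 1
        · have hteq := hfix hr
          rw [if_pos (by omega : 1 < (pvLoopB (pvStrip p m) (c + 1) ps).1)]
          exact (decide_eq_false (by omega)).symm
        · split
          · exact (decide_eq_false (by omega)).symm
          · exact (decide_eq_false (by omega)).symm
    · simp only [if_neg h]
      exact ih m c hm hLtail

-- ===== VERDICT (by name: the statement is the Claim_ definition above) =====
theorem is_prime_power_spec : Claim_equal_is_prime_power := by
  intro n _
  unfold Spec_is_prime_power is_prime_power is_prime_power_alt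
  by_cases hn : n ≤ 1
  · simp [hn]
  · rw [if_neg hn, if_neg hn]
    have hm : 2 ≤ n.toNat := by omega
    have hL : ∀ p ∈ List.range' 2 (Nat.sqrt n.toNat + 1 - 2), 2 ≤ p := by
      intro p hp
      exact (List.mem_range'_1.mp hp).1
    exact pvMain _ n.toNat 0 hm hL
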